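-- pv_equiv track=rewrite | github.com/tylermcm/ImageTriager | image_triage/production_workflows.py | recipe_key_for_name
-- ===== SOURCE A (Python) =====
-- def recipe_key_for_name(name: str) -> str:
--     text = " ".join((name or "").strip().split())
--     if not text:
--         return ""
--     cleaned = [
--         character.lower()
--         if character.isalnum()
--         else "_"
--         for character in text
--     ]
--     normalized = "".join(cleaned).strip("_")
--     while "__" in normalized:
--         normalized = normalized.replace("__", "_")
--     return normalized
-- ===== SOURCE B (Python) =====
-- def recipe_key_for_name(name: str) -> str:
--     # Single scan: collect maximal alphanumeric runs, lowercase each, join with "_".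
--     s = name or ""
--     n = len(s)
--     parts = []
--     i = 0
--     while i < n:
--         if s[i].isalnum():
--             j = i
--             while j < n and s[j].isalnum():
--                 j += 1
--             parts.append(s[i:j].lower())
--             i = j
--         else:
--             i += 1
--     return "_".join(parts)
-- ===== Notes on version B (the rewrite author's own statement) =====
-- stated objective: alternative
-- what changed: Replaces A's whitespace-normalize / per-char map to '_' / strip / repeated replace('__','_') pipeline by a single left-to-right scan that collects maximal alphanumeric runs, lowercases each, and joins them with '_'.
import Mathlib
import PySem

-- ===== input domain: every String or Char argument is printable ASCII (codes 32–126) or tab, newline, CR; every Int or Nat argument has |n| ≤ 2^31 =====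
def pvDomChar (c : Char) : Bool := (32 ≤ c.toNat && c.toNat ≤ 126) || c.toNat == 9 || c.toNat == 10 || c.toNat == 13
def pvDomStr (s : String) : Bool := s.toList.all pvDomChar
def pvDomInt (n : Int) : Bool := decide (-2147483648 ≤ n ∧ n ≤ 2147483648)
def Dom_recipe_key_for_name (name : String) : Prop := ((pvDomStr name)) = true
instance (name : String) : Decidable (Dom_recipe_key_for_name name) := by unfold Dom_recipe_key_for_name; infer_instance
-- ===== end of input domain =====

-- B rebuilds the key by one scan over maximal alphanumeric runs instead of A's map/strip/collapse pipeline (objective: alternative).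

-- ===== PORT A =====
-- the `while "__" in normalized: normalized = normalized.replace("__", "_")` loop;
-- the fuel argument (called with the string's length) only makes the loop total: a taken
-- iteration shortens the string, so the fuel is never exhausted (proved below).
def pvCollapseA : Nat → List Char → List Char
  | 0, cs => cs
  | n + 1, cs =>
    if PySem.Chars.isIn ['_', '_'] cs then pvCollapseA n (PySem.Chars.replace cs ['_', '_'] ['_']) else cs

-- literal port of A ((name or "") = name, since "" is the only falsy str)
def recipe_key_for_name (name : String) : String :=
  let s := name.toList
  let text := PySem.Chars.join [' '] (PySem.Chars.split₀ (PySem.Chars.strip s))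
  if text.isEmpty then "" else
    let cleaned := text.map (fun c => if PySem.Chars.isalnum c then PySem.Chars.lower [c] else ['_'])
    let normalized := PySem.Chars.stripChars (PySem.Chars.join [] cleaned) ['_']
    String.ofList (pvCollapseA normalized.length normalized)

-- ===== PORT B =====
-- the outer while-loop of Source B: skip a non-alphanumeric char, or take a whole
-- maximal alphanumeric run (the inner `while j < n and s[j].isalnum()` scan)
def pvGroupsAlnum : List Char → List (List Char)
  | [] => []
  | c :: t =>
    if PySem.Chars.isalnum c then
      (c :: t.takeWhile PySem.Chars.isalnum) :: pvGroupsAlnum (t.dropWhile PySem.Chars.isalnum)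
    else pvGroupsAlnum t
termination_by l => l.length
decreasing_by
  · exact Nat.lt_succ_of_le (List.length_dropWhile_le PySem.Chars.isalnum t)
  · exact Nat.lt_succ_self _

def recipe_key_for_name_alt (name : String) : String :=
  String.ofList (PySem.Chars.join ['_'] ((pvGroupsAlnum name.toList).map PySem.Chars.lower))

-- ===== PRECONDITION & SPEC =====
def Spec_recipe_key_for_name (name : String) (out : String) : Prop := out = recipe_key_for_name_alt name
instance (name : String) (out : String) : Decidable (Spec_recipe_key_for_name name out) := by unfold Spec_recipe_key_for_name; infer_instance

-- ===== CLAIM (what is proved, stated in full; the proofs are below) =====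
def Claim_equal_recipe_key_for_name : Prop := ∀ (name : String), Dom_recipe_key_for_name name → Spec_recipe_key_for_name name (recipe_key_for_name name)

-- ===== LEMMAS AND PROOFS =====

-- maximal runs of p-characters of a list (the common abstraction both ports reduce to)
def pvGroups (p : Char → Bool) : List Char → List (List Char)
  | [] => []
  | c :: t => if p c then (c :: t.takeWhile p) :: pvGroups p (t.dropWhile p) else pvGroups p t
termination_by l => l.length
decreasing_by
  · exact Nat.lt_succ_of_le (List.length_dropWhile_le p t)
  · exact Nat.lt_succ_self _

-- the predicates the proof tracks: non-whitespace, non-underscore, and A's per-char map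
def pvNsp (c : Char) : Bool := !PySem.Chars.isspace c
def pvNotU (c : Char) : Bool := c != '_'
def pvF (c : Char) : Char := if PySem.Chars.isalnum c then PySem.Chars.lowerChar c else '_'

theorem pvGroups_nil (p : Char → Bool) : pvGroups p [] = [] := by simp [pvGroups]

theorem pvGroups_cons_pos (p : Char → Bool) (c : Char) (t : List Char) (h : p c = true) :
    pvGroups p (c :: t) = (c :: t.takeWhile p) :: pvGroups p (t.dropWhile p) := by
  rw [pvGroups]; simp [h]

theorem pvGroups_cons_neg (p : Char → Bool) (c : Char) (t : List Char) (h : p c = false) :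
    pvGroups p (c :: t) = pvGroups p t := by
  rw [pvGroups]; simp [h]

theorem pvGroupsAlnum_eq (l : List Char) : pvGroupsAlnum l = pvGroups PySem.Chars.isalnum l := by
  induction l using pvGroupsAlnum.induct with
  | case1 => simp [pvGroupsAlnum, pvGroups]
  | case2 c t h ih =>
    rw [pvGroupsAlnum, pvGroups_cons_pos _ _ _ h]; simp [h, ih]
  | case3 c t h ih =>
    rw [pvGroupsAlnum, pvGroups_cons_neg _ _ _ (by simpa using h)]
    simpa [h] using ih

theorem pvGroups_all_neg (p : Char → Bool) (l : List Char) (h : ∀ c ∈ l, p c = false) :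
    pvGroups p l = [] := by
  induction l with
  | nil => simp [pvGroups]
  | cons c t ih =>
    rw [pvGroups_cons_neg _ _ _ (h c (by simp))]
    exact ih (fun x hx => h x (by simp [hx]))

theorem pvGroups_mem_pos (p : Char → Bool) (l : List Char) :
    ∀ g ∈ pvGroups p l, ∀ c ∈ g, p c = true := by
  induction l using pvGroups.induct p with
  | case1 => simp [pvGroups]
  | case2 c t h ih =>
    rw [pvGroups_cons_pos _ _ _ h]
    intro g hg
    rcases List.mem_cons.mp hg with rfl | hg'
    · intro x hx
      rcases List.mem_cons.mp hx with rfl | hx'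
      · exact h
      · exact List.mem_takeWhile_imp hx'
    · exact ih g hg'
  | case3 c t h ih =>
    rw [pvGroups_cons_neg _ _ _ (by simpa using h)]
    exact ih

theorem pvGroups_ne_nil (p : Char → Bool) (l : List Char) :
    ∀ g ∈ pvGroups p l, g ≠ [] := by
  induction l using pvGroups.induct p with
  | case1 => simp [pvGroups]
  | case2 c t h ih =>
    rw [pvGroups_cons_pos _ _ _ h]
    intro g hg
    rcases List.mem_cons.mp hg with rfl | hg'
    · simp
    · exact ih g hg'
  | case3 c t h ih =>
    rw [pvGroups_cons_neg _ _ _ (by simpa using h)]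
    exact ih

-- the first character surviving dropWhile fails the predicate
theorem pvHead?_dropWhile (q : Char → Bool) (l : List Char) (c : Char)
    (h : (l.dropWhile q).head? = some c) : q c = false := by
  induction l with
  | nil => simp at h
  | cons d t ih =>
    rw [List.dropWhile_cons] at h
    by_cases hd : q d = true
    · rw [if_pos hd] at h; exact ih h
    · rw [if_neg hd] at h
      have : c = d := by simpa using h.symm
      subst this
      simpa using hd

theorem pvLast?_rdropWhile (q : Char → Bool) (l : List Char) (c : Char)
    (h : (l.rdropWhile q).getLast? = some c) : q c = false := by
  rw [List.rdropWhile, List.getLast?_reverse] at h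
  exact pvHead?_dropWhile q l.reverse c h

-- splitting at a separator character that fails p
theorem pvGroups_append_sep (p : Char → Bool) (c : Char) (hc : p c = false) (a b : List Char) :
    pvGroups p (a ++ c :: b) = pvGroups p a ++ pvGroups p b := by
  induction a using pvGroups.induct p with
  | case1 =>
    simp only [List.nil_append, pvGroups_nil, List.nil_append]
    rw [pvGroups_cons_neg _ _ _ hc]
    try simp
  | case2 d t h ih =>
    rw [List.cons_append, pvGroups_cons_pos _ _ _ h, pvGroups_cons_pos _ _ _ h,
      List.takeWhile_append, List.dropWhile_append]
    by_cases hall : ∀ x ∈ t, p x = true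
    · have htw : t.takeWhile p = t := List.takeWhile_eq_self_iff.mpr hall
      have hdw : t.dropWhile p = [] := List.dropWhile_eq_nil_iff.mpr hall
      rw [if_pos (by rw [htw]), if_pos (by rw [hdw]; rfl)]
      rw [List.takeWhile_cons, if_neg (by simp [hc]), List.dropWhile_cons, if_neg (by simp [hc])]
      rw [pvGroups_cons_neg _ _ _ hc, htw, hdw, pvGroups_nil]
      simp
    · have htw : t.takeWhile p ≠ t := fun h' => hall (List.takeWhile_eq_self_iff.mp h')
      have hlen : (t.takeWhile p).length ≠ t.length := by
        intro h'
        exact htw ((List.takeWhile_prefix p).eq_of_length h')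
      have hdw : t.dropWhile p ≠ [] := fun h' => hall (List.dropWhile_eq_nil_iff.mp h')
      rw [if_neg hlen, if_neg (by simpa using hdw), ih]
      simp
  | case3 d t h ih =>
    have h' : p d = false := by simpa using h
    rw [List.cons_append, pvGroups_cons_neg _ _ _ h', pvGroups_cons_neg _ _ _ h']
    exact ih

theorem pvGroups_append_headneg (p : Char → Bool) (a b : List Char)
    (hb : ∀ c, b.head? = some c → p c = false) :
    pvGroups p (a ++ b) = pvGroups p a ++ pvGroups p b := by
  cases b with
  | nil => simp [pvGroups_nil]
  | cons c b' =>
    rw [pvGroups_append_sep p c (hb c rfl) a b', pvGroups_cons_neg _ _ _ (hb c rfl)]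

theorem pvGroups_append_allneg (p : Char → Bool) (l t : List Char) (h : ∀ c ∈ t, p c = false) :
    pvGroups p (l ++ t) = pvGroups p l := by
  cases t with
  | nil => simp
  | cons c t' =>
    rw [pvGroups_append_sep p c (h c (by simp)) l t',
      pvGroups_all_neg p t' (fun x hx => h x (by simp [hx]))]
    simp

theorem pvGroups_dropWhile (p q : Char → Bool) (l : List Char)
    (h : ∀ c, q c = true → p c = false) :
    pvGroups p (l.dropWhile q) = pvGroups p l := by
  induction l with
  | nil => simp
  | cons c t ih =>
    rw [List.dropWhile_cons]
    by_cases hq : q c = true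
    · rw [if_pos hq, ih, pvGroups_cons_neg _ _ _ (h c hq)]
    · rw [if_neg hq]

theorem pvGroups_rdropWhile (p q : Char → Bool) (l : List Char)
    (h : ∀ c, q c = true → p c = false) :
    pvGroups p (l.rdropWhile q) = pvGroups p l := by
  conv_rhs => rw [← List.rdropWhile_append_rtakeWhile (p := q) (l := l)]
  exact (pvGroups_append_allneg p _ _ (fun c hc => h c (List.mem_rtakeWhile_imp hc))).symm

-- str.split() produces exactly the maximal non-whitespace runs
theorem pvSplit₀_go_spec (l : List Char) : ∀ (cur : List Char) (acc : List (List Char)),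
    PySem.Chars.split₀.go l cur acc = acc.reverse ++
      (if cur.isEmpty then pvGroups pvNsp l
       else (cur.reverse ++ l.takeWhile pvNsp) :: pvGroups pvNsp (l.dropWhile pvNsp)) := by
  induction l with
  | nil =>
    intro cur acc
    rw [PySem.Chars.split₀.go]
    cases cur with
    | nil => simp [pvGroups_nil]
    | cons x xs => simp [pvGroups_nil]
  | cons c rest ih =>
    intro cur acc
    rw [PySem.Chars.split₀.go]
    by_cases hsp : PySem.Chars.isspace c = true
    · have hnsp : pvNsp c = false := by simp [pvNsp, hsp]
      rw [if_pos hsp]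
      cases cur with
      | nil =>
        rw [if_pos (by simp), ih [] acc]
        simp [pvGroups_cons_neg _ _ _ hnsp]
      | cons x xs =>
        rw [if_neg (by simp), ih [] ((x :: xs).reverse :: acc)]
        simp [pvGroups_cons_neg _ _ _ hnsp, hnsp]
    · have hnsp : pvNsp c = true := by simp [pvNsp, hsp]
      rw [if_neg hsp, ih (c :: cur) acc]
      cases cur with
      | nil =>
        simp [pvGroups_cons_pos _ _ _ hnsp]
      | cons x xs =>
        simp [hnsp]

theorem pvSplit₀_eq (l : List Char) :
    PySem.Chars.split₀ l = pvGroups pvNsp l := by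
  rw [PySem.Chars.split₀, pvSplit₀_go_spec l [] []]
  simp

-- refining a coarse grouping: p-runs never cross a q-run boundary when p implies q
theorem pvGroups_refine (p q : Char → Bool) (himp : ∀ c, p c = true → q c = true) (l : List Char) :
    pvGroups p l = (pvGroups q l).flatMap (pvGroups p) := by
  induction l using pvGroups.induct q with
  | case1 => simp [pvGroups_nil]
  | case2 c t h ih =>
    rw [pvGroups_cons_pos _ _ _ h, List.flatMap_cons, ← ih]
    have hsplit : c :: t = (c :: t.takeWhile q) ++ t.dropWhile q := by
      simp [List.takeWhile_append_dropWhile]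
    conv_lhs => rw [hsplit]
    rw [pvGroups_append_headneg]
    intro e he
    have hqe : q e = false := pvHead?_dropWhile q t e he
    cases hpe : p e with
    | false => rfl
    | true => rw [himp e hpe] at hqe; exact absurd hqe (by simp)
  | case3 c t h ih =>
    have hq : q c = false := by simpa using h
    have hp : p c = false := by
      cases hpe : p c with
      | false => rfl
      | true => rw [himp c hpe] at hq; exact absurd hq (by simp)
    rw [pvGroups_cons_neg _ _ _ hq, pvGroups_cons_neg _ _ _ hp]
    exact ih

theorem pvGroups_join_sep (p : Char → Bool) (c : Char) (hc : p c = false) (gs : List (List Char)) :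
    pvGroups p (PySem.Chars.join [c] gs) = gs.flatMap (pvGroups p) := by
  induction gs with
  | nil => simp [PySem.Chars.join_nil, pvGroups_nil]
  | cons g gs' ih =>
    cases gs' with
    | nil => simp [PySem.Chars.join_singleton]
    | cons g2 gs'' =>
      rw [PySem.Chars.join_cons_cons]
      have h1 : g ++ [c] ++ PySem.Chars.join [c] (g2 :: gs'') =
          g ++ c :: PySem.Chars.join [c] (g2 :: gs'') := by simp
      rw [h1, pvGroups_append_sep p c hc, ih]
      simp [List.flatMap_cons]

theorem pvGroups_map (p q : Char → Bool) (g : Char → Char) (h : ∀ c, q (g c) = p c)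
    (l : List Char) : pvGroups q (l.map g) = (pvGroups p l).map (List.map g) := by
  have hfun : (q ∘ g) = p := funext h
  induction l using pvGroups.induct p with
  | case1 => simp [pvGroups_nil]
  | case2 c t hp ih =>
    rw [List.map_cons, pvGroups_cons_pos _ _ _ (by rw [h c]; exact hp),
      pvGroups_cons_pos _ _ _ hp, List.map_cons, List.takeWhile_map, List.dropWhile_map,
      hfun, List.map_cons, ih]
  | case3 c t hp ih =>
    have hp' : p c = false := by simpa using hp
    rw [List.map_cons, pvGroups_cons_neg _ _ _ (by rw [h c]; exact hp'),
      pvGroups_cons_neg _ _ _ hp']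
    exact ih

-- ===== character-level facts =====
theorem pvSpace_not_alnum (c : Char) (h : PySem.Chars.isspace c = true) :
    PySem.Chars.isalnum c = false := by
  simp only [PySem.Chars.isspace, decide_eq_true_eq, Bool.or_eq_true, Bool.and_eq_true] at h
  simp only [PySem.Chars.isalnum, PySem.Chars.isalpha, PySem.Chars.isdigit, PySem.Chars.isupper,
    PySem.Chars.islower, Bool.or_eq_false_iff, Bool.and_eq_false_iff, decide_eq_false_iff_not,
    Char.le_def, UInt32.le_iff_toNat_le]
  have h65 : ('A' : Char).val.toNat = 65 := by decide
  have h90 : ('Z' : Char).val.toNat = 90 := by decide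
  have h97 : ('a' : Char).val.toNat = 97 := by decide
  have h122 : ('z' : Char).val.toNat = 122 := by decide
  have h48 : ('0' : Char).val.toNat = 48 := by decide
  have h57 : ('9' : Char).val.toNat = 57 := by decide
  have hcn : c.toNat = c.val.toNat := rfl
  rw [hcn] at h
  omega

theorem pvAlnum_lower_ne_underscore (c : Char) (h : PySem.Chars.isalnum c = true) :
    PySem.Chars.lowerChar c ≠ '_' := by
  unfold PySem.Chars.lowerChar
  by_cases hu : PySem.Chars.isupper c = true
  · rw [if_pos hu]
    simp only [PySem.Chars.isupper, Bool.and_eq_true, decide_eq_true_eq, Char.le_def,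
      UInt32.le_iff_toNat_le] at hu
    have h65 : ('A' : Char).val.toNat = 65 := by decide
    have h90 : ('Z' : Char).val.toNat = 90 := by decide
    have hcn : c.toNat = c.val.toNat := rfl
    intro heq
    have hval : (Char.ofNat (c.toNat + 32)).toNat = ('_' : Char).toNat := by rw [heq]
    have hvalid : Nat.isValidChar (c.toNat + 32) := by left; omega
    rw [Char.toNat_ofNat, if_pos hvalid] at hval
    have h95 : ('_' : Char).toNat = 95 := by decide
    omega
  · rw [if_neg hu]
    intro heq
    subst heq
    exact absurd h (by decide)

theorem pvNotU_f (c : Char) : pvNotU (pvF c) = PySem.Chars.isalnum c := by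
  unfold pvNotU pvF
  by_cases h : PySem.Chars.isalnum c = true
  · simp [h, pvAlnum_lower_ne_underscore c h]
  · simp [h]

theorem pvAlnum_imp_nsp (c : Char) (h : PySem.Chars.isalnum c = true) : pvNsp c = true := by
  unfold pvNsp
  by_cases hs : PySem.Chars.isspace c = true
  · rw [pvSpace_not_alnum c hs] at h; exact absurd h (by simp)
  · simp [hs]

-- ===== strip / stripChars only remove characters the grouping ignores =====
theorem pvGroups_strip (l : List Char) :
    pvGroups pvNsp (PySem.Chars.strip l) = pvGroups pvNsp l := by
  have hq : ∀ c, PySem.Chars.isspace c = true → pvNsp c = false := by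
    intro c hc; simp [pvNsp, hc]
  unfold PySem.Chars.strip PySem.Chars.rstrip PySem.Chars.lstrip
  have h1 : (List.dropWhile PySem.Chars.isspace
      (List.dropWhile PySem.Chars.isspace l).reverse).reverse =
      (List.dropWhile PySem.Chars.isspace l).rdropWhile PySem.Chars.isspace := rfl
  rw [h1, pvGroups_rdropWhile _ _ _ hq, pvGroups_dropWhile _ _ _ hq]

theorem pvStripChars_underscore_eq (l : List Char) :
    PySem.Chars.stripChars l ['_'] =
      (List.dropWhile (fun c => List.contains ['_'] c) l).rdropWhile
        (fun c => List.contains ['_'] c) := rfl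

theorem pvUnd_notU (c : Char) (h : List.contains ['_'] c = true) : pvNotU c = false := by
  have hc : c = '_' := by simpa using h
  simp [pvNotU, hc]

theorem pvGroups_stripChars (l : List Char) :
    pvGroups pvNotU (PySem.Chars.stripChars l ['_']) = pvGroups pvNotU l := by
  rw [pvStripChars_underscore_eq, pvGroups_rdropWhile _ _ _ pvUnd_notU,
    pvGroups_dropWhile _ _ _ pvUnd_notU]

theorem pvStripChars_head (l : List Char) (c : Char)
    (h : (PySem.Chars.stripChars l ['_']).head? = some c) : c ≠ '_' := by
  rw [pvStripChars_underscore_eq] at h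
  obtain ⟨u, hu⟩ := List.rdropWhile_prefix (fun c => List.contains ['_'] c)
    (List.dropWhile (fun c => List.contains ['_'] c) l)
  cases hr : (List.dropWhile (fun c => List.contains ['_'] c) l).rdropWhile
      (fun c => List.contains ['_'] c) with
  | nil => rw [hr] at h; simp at h
  | cons c0 r' =>
    rw [hr] at h
    have hc0 : c = c0 := by simpa using h.symm
    subst hc0
    rw [hr] at hu
    have hhead : (List.dropWhile (fun c => List.contains ['_'] c) l).head? = some c := by
      rw [← hu]; rfl
    have hfin := pvHead?_dropWhile _ l c hhead
    intro heq
    rw [heq] at hfin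
    exact absurd hfin (by decide)

theorem pvStripChars_last (l : List Char) (c : Char)
    (h : (PySem.Chars.stripChars l ['_']).getLast? = some c) : c ≠ '_' := by
  rw [pvStripChars_underscore_eq] at h
  have hfin := pvLast?_rdropWhile _ _ _ h
  intro heq
  rw [heq] at hfin
  exact absurd hfin (by decide)

-- ===== one pass of normalized.replace("__", "_") =====
def pvRep1 : List Char → List Char
  | [] => []
  | [c] => [c]
  | c :: d :: t => if c = '_' ∧ d = '_' then '_' :: pvRep1 t else c :: pvRep1 (d :: t)
termination_by l => l.length
decreasing_by
  · simp only [List.length_cons]; omega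
  · simp only [List.length_cons]; omega

theorem pvReplaceGo_zero (l acc : List Char) :
    PySem.Chars.replace.go ['_', '_'] ['_'] 0 l acc = acc.reverse ++ l := by
  rw [PySem.Chars.replace.go]


theorem pvReplaceGo_nil (fuel : Nat) (acc : List Char) :
    PySem.Chars.replace.go ['_', '_'] ['_'] fuel [] acc = acc.reverse := by
  cases fuel with
  | zero => rw [PySem.Chars.replace.go]; try simp
  | succ n => rw [PySem.Chars.replace.go]; try simp

theorem pvReplaceGo_succ (fuel : Nat) (c : Char) (t acc : List Char) :
    PySem.Chars.replace.go ['_', '_'] ['_'] (fuel + 1) (c :: t) acc =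
      if (['_', '_'] : List Char).isPrefixOf (c :: t) then
        PySem.Chars.replace.go ['_', '_'] ['_'] fuel
          (List.drop (['_', '_'] : List Char).length (c :: t)) (['_'].reverse ++ acc)
      else PySem.Chars.replace.go ['_', '_'] ['_'] fuel t (c :: acc) := by
  rw [PySem.Chars.replace.go]

theorem pvReplaceGo_spec (fuel : Nat) : ∀ (l acc : List Char), l.length ≤ fuel →
    PySem.Chars.replace.go ['_', '_'] ['_'] fuel l acc = acc.reverse ++ pvRep1 l := by
  induction fuel with
  | zero =>
    intro l acc hl
    have : l = [] := by cases l <;> simp_all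
    subst this
    rw [pvReplaceGo_zero]
    simp [pvRep1]
  | succ n ih =>
    intro l acc hl
    cases l with
    | nil => rw [pvReplaceGo_nil]; simp [pvRep1]
    | cons c t =>
      rw [pvReplaceGo_succ]
      cases t with
      | nil =>
        rw [if_neg (by simp [List.isPrefixOf])]
        rw [pvReplaceGo_nil]
        simp [pvRep1]
      | cons d t' =>
        by_cases hcd : c = '_' ∧ d = '_'
        · obtain ⟨rfl, rfl⟩ := hcd
          rw [if_pos (by simp [List.isPrefixOf])]
          have ht' : t'.length ≤ n := by simp at hl; omega
          rw [show List.drop (['_', '_'] : List Char).length ('_' :: '_' :: t') = t' from rfl]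
          rw [ih t' _ ht']
          rw [pvRep1]
          simp
        · rw [if_neg (by
            simp [List.isPrefixOf]
            intro h1 h2
            exact hcd ⟨h1.symm, h2.symm⟩)]
          have hdt : (d :: t').length ≤ n := by simpa using hl
          rw [ih (d :: t') _ hdt]
          rw [pvRep1, if_neg hcd]
          simp

theorem pvReplace_eq_rep1 (cs : List Char) :
    PySem.Chars.replace cs ['_', '_'] ['_'] = pvRep1 cs := by
  rw [PySem.Chars.replace]
  rw [if_neg (by simp)]
  simpa using pvReplaceGo_spec cs.length cs [] le_rfl

theorem pvRep1_length_le (cs : List Char) : (pvRep1 cs).length ≤ cs.length := by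
  induction cs using pvRep1.induct with
  | case1 => simp [pvRep1]
  | case2 c => simp [pvRep1]
  | case3 c d t hcd ih =>
    rw [pvRep1, if_pos hcd]
    simp only [List.length_cons]
    omega
  | case4 c d t hcd ih =>
    rw [pvRep1, if_neg hcd]
    simpa using ih

theorem pvRep1_length_lt (cs : List Char) (h : ['_', '_'] <:+: cs) :
    (pvRep1 cs).length < cs.length := by
  induction cs using pvRep1.induct with
  | case1 => have := h.length_le; simp at this
  | case2 c => have := h.length_le; simp at this
  | case3 c d t hcd ih =>
    rw [pvRep1, if_pos hcd]
    have := pvRep1_length_le t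
    simp only [List.length_cons]
    omega
  | case4 c d t hcd ih =>
    rw [pvRep1, if_neg hcd]
    have hinf : ['_', '_'] <:+: (d :: t) := by
      rcases List.infix_cons_iff.mp h with hpre | hinf
      · exfalso
        rcases List.cons_prefix_cons.mp hpre with ⟨h1, hrest⟩
        rcases List.cons_prefix_cons.mp hrest with ⟨h2, _⟩
        exact hcd ⟨h1.symm, h2.symm⟩
      · exact hinf
    have := ih hinf
    simpa using Nat.succ_lt_succ this

theorem pvRep1_ne_nil (cs : List Char) (h : cs ≠ []) : pvRep1 cs ≠ [] := by
  cases cs with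
  | nil => exact absurd rfl h
  | cons c t =>
    cases t with
    | nil => simp [pvRep1]
    | cons d t' =>
      rw [pvRep1]
      by_cases hcd : c = '_' ∧ d = '_'
      · simp [hcd]
      · simp [hcd]

theorem pvRep1_head (c : Char) (t : List Char) : (pvRep1 (c :: t)).head? = some c := by
  cases t with
  | nil => simp [pvRep1]
  | cons d t' =>
    rw [pvRep1]
    by_cases hcd : c = '_' ∧ d = '_'
    · rw [if_pos hcd]; simp [hcd.1]
    · rw [if_neg hcd]; simp

theorem pvRep1_last (cs : List Char) : ∀ (e : Char), cs.getLast? = some e → e ≠ '_' →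
    (pvRep1 cs).getLast? = some e := by
  induction cs using pvRep1.induct with
  | case1 => intro e he _; simp at he
  | case2 c => intro e he _; rw [pvRep1]; exact he
  | case3 c d t hcd ih =>
    intro e he hne
    obtain ⟨rfl, rfl⟩ := hcd
    by_cases htne : t = []
    · exfalso
      subst htne
      simp at he
      exact hne he.symm
    · have hlast : t.getLast? = some e := by
        have h2 : ('_' :: '_' :: t).getLast? = t.getLast? := by
          rw [show ('_' :: '_' :: t) = ['_', '_'] ++ t from rfl]
          exact List.getLast?_append_of_ne_nil _ htne
        rw [← h2]; exact he
      rw [pvRep1, if_pos ⟨rfl, rfl⟩]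
      rw [show ('_' :: pvRep1 t) = ['_'] ++ pvRep1 t from rfl]
      rw [List.getLast?_append_of_ne_nil _ (pvRep1_ne_nil t htne)]
      exact ih e hlast hne
  | case4 c d t hcd ih =>
    intro e he hne
    have hlast : (d :: t).getLast? = some e := by
      have h2 : (c :: d :: t).getLast? = (d :: t).getLast? := by
        rw [show (c :: d :: t) = [c] ++ (d :: t) from rfl]
        exact List.getLast?_append_of_ne_nil _ (by simp)
      rw [← h2]; exact he
    rw [pvRep1, if_neg hcd]
    rw [show (c :: pvRep1 (d :: t)) = [c] ++ pvRep1 (d :: t) from rfl]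
    rw [List.getLast?_append_of_ne_nil _ (pvRep1_ne_nil _ (by simp))]
    exact ih e hlast hne

theorem pvRep1_append (a b : List Char) (ha : ∀ x ∈ a, x ≠ '_') :
    pvRep1 (a ++ b) = a ++ pvRep1 b := by
  induction a with
  | nil => simp
  | cons c a' ih =>
    have hc : c ≠ '_' := ha c (by simp)
    cases hab : a' ++ b with
    | nil =>
      have ha' : a' = [] := by cases a' <;> simp_all
      have hb : b = [] := by cases b <;> simp_all
      subst ha'; subst hb
      simp [pvRep1]
    | cons d u =>
      rw [List.cons_append, hab, pvRep1, if_neg (by intro hx; exact hc hx.1)]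
      rw [← hab, ih (fun x hx => ha x (by simp [hx]))]
      simp

theorem pvRep1_groups_aux (n : Nat) : ∀ (cs : List Char), cs.length ≤ n →
    pvGroups pvNotU (pvRep1 cs) = pvGroups pvNotU cs := by
  induction n with
  | zero =>
    intro cs h
    have : cs = [] := by cases cs <;> simp_all
    subst this; simp [pvRep1]
  | succ n ih =>
    intro cs hn
    cases cs with
    | nil => simp [pvRep1]
    | cons c t =>
      by_cases hc : c = '_'
      · subst hc
        cases t with
        | nil => simp [pvRep1]
        | cons d t' =>
          have hU : pvNotU '_' = false := by simp [pvNotU]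
          by_cases hd : d = '_'
          · subst hd
            rw [pvRep1, if_pos ⟨rfl, rfl⟩]
            rw [pvGroups_cons_neg _ _ _ hU, pvGroups_cons_neg _ _ _ hU,
              pvGroups_cons_neg _ _ _ hU]
            exact ih t' (by simp at hn; omega)
          · rw [pvRep1, if_neg (by intro hx; exact hd hx.2)]
            rw [pvGroups_cons_neg _ _ _ hU, pvGroups_cons_neg _ _ _ hU]
            exact ih (d :: t') (by simpa using hn)
      · have hana : ∀ x ∈ (c :: t.takeWhile pvNotU), x ≠ '_' := by
          intro x hx
          rcases List.mem_cons.mp hx with rfl | hx'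
          · exact hc
          · have := List.mem_takeWhile_imp hx'
            simpa [pvNotU] using this
        have hbhead : ∀ e, (t.dropWhile pvNotU).head? = some e → pvNotU e = false :=
          fun e he => pvHead?_dropWhile pvNotU t e he
        have hrb : ∀ e, (pvRep1 (t.dropWhile pvNotU)).head? = some e → pvNotU e = false := by
          intro e he
          cases hb : t.dropWhile pvNotU with
          | nil => rw [hb] at he; simp [pvRep1] at he
          | cons e0 b' =>
            rw [hb, pvRep1_head] at he
            have : e = e0 := by simpa using he.symm
            subst this
            exact hbhead e (by rw [hb]; rfl)
        have hsplit : c :: t = (c :: t.takeWhile pvNotU) ++ t.dropWhile pvNotU := by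
          simp [List.takeWhile_append_dropWhile]
        rw [hsplit, pvRep1_append _ _ hana,
          pvGroups_append_headneg _ _ _ hrb, pvGroups_append_headneg _ _ _ hbhead]
        have hblen : (t.dropWhile pvNotU).length ≤ n := by
          have h1 : (t.dropWhile pvNotU).length ≤ t.length := List.length_dropWhile_le _ _
          simp at hn
          omega
        rw [ih _ hblen]

theorem pvRep1_groups (cs : List Char) :
    pvGroups pvNotU (pvRep1 cs) = pvGroups pvNotU cs :=
  pvRep1_groups_aux cs.length cs le_rfl

-- a string with no "__", no leading and no trailing '_' IS the join of its runs
theorem pvNoDouble_join_aux (n : Nat) : ∀ (cs : List Char), cs.length ≤ n →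
    ¬(['_', '_'] <:+: cs) →
    (∀ e, cs.head? = some e → e ≠ '_') →
    (∀ e, cs.getLast? = some e → e ≠ '_') →
    cs = PySem.Chars.join ['_'] (pvGroups pvNotU cs) := by
  induction n with
  | zero =>
    intro cs h _ _ _
    have : cs = [] := by cases cs <;> simp_all
    subst this
    simp [pvGroups_nil, PySem.Chars.join_nil]
  | succ n ih =>
    intro cs hn hinf hhead hlast
    cases cs with
    | nil => simp [pvGroups_nil, PySem.Chars.join_nil]
    | cons c t =>
      have hc : c ≠ '_' := hhead c rfl
      have hcU : pvNotU c = true := by simp [pvNotU, hc]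
      have hsplit : c :: t = (c :: t.takeWhile pvNotU) ++ t.dropWhile pvNotU := by
        simp [List.takeWhile_append_dropWhile]
      rw [pvGroups_cons_pos _ _ _ hcU]
      cases hb : t.dropWhile pvNotU with
      | nil =>
        rw [pvGroups_nil, PySem.Chars.join_singleton]
        conv_lhs => rw [hsplit, hb]
        simp
      | cons e b' =>
        have he : e = '_' := by
          have h1 := pvHead?_dropWhile pvNotU t e (by rw [hb]; rfl)
          simpa [pvNotU] using h1
        subst he
        have hbsuf : t.dropWhile pvNotU <:+ (c :: t) :=
          (List.dropWhile_suffix pvNotU).trans (List.suffix_cons c t)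
        cases hb' : b' with
        | nil =>
          exfalso
          have hle : (c :: t).getLast? = some '_' := by
            conv_lhs => rw [hsplit, hb, hb']
            rw [List.getLast?_append_of_ne_nil _ (by simp)]
            rfl
          exact hlast '_' hle rfl
        | cons f b'' =>
          have hf : f ≠ '_' := by
            intro hfeq
            subst hfeq
            apply hinf
            have hpre : ['_', '_'] <+: t.dropWhile pvNotU := by
              rw [hb, hb']
              exact ⟨b'', rfl⟩
            exact hpre.isInfix.trans hbsuf.isInfix
          have hb'suf : b' <:+ (c :: t) := by
            have h1 : b' <:+ t.dropWhile pvNotU := by rw [hb]; exact List.suffix_cons '_' b'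
            exact h1.trans hbsuf
          have hb'len : b'.length ≤ n := by
            have h1 : (t.dropWhile pvNotU).length ≤ t.length := List.length_dropWhile_le _ _
            have h2 : b'.length + 1 = (t.dropWhile pvNotU).length := by rw [hb]; simp
            simp at hn
            omega
          have hb'inf : ¬(['_', '_'] <:+: b') := fun hx => hinf (hx.trans hb'suf.isInfix)
          have hb'head : ∀ e, b'.head? = some e → e ≠ '_' := by
            intro e heq
            rw [hb'] at heq
            have : e = f := by simpa using heq.symm
            subst this
            exact hf
          have hb'last : ∀ e, b'.getLast? = some e → e ≠ '_' := by
            intro e heq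
            apply hlast e
            conv_lhs => rw [hsplit, hb]
            rw [show (c :: t.takeWhile pvNotU) ++ '_' :: b' =
              ((c :: t.takeWhile pvNotU) ++ ['_']) ++ b' by simp]
            rw [List.getLast?_append_of_ne_nil _ (by rw [hb']; simp)]
            exact heq
          have hIH := ih b' hb'len hb'inf hb'head hb'last
          rw [pvGroups_cons_neg _ _ _ (show pvNotU '_' = false by simp [pvNotU]), ← hb']
          have hb'g : pvGroups pvNotU b' ≠ [] := by
            rw [hb', pvGroups_cons_pos _ _ _ (by simp [pvNotU, hf])]
            simp
          have hjoin : PySem.Chars.join ['_'] ((c :: t.takeWhile pvNotU) :: pvGroups pvNotU b') =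
              (c :: t.takeWhile pvNotU) ++ ['_'] ++ PySem.Chars.join ['_'] (pvGroups pvNotU b') := by
            cases hx : pvGroups pvNotU b' with
            | nil => exact absurd hx hb'g
            | cons q rest => rw [PySem.Chars.join_cons_cons]
          rw [hjoin, ← hIH]
          conv_lhs => rw [hsplit, hb]
          simp

theorem pvCollapse_spec (n : Nat) : ∀ (cs : List Char), cs.length ≤ n + 1 →
    (∀ e, cs.head? = some e → e ≠ '_') →
    (∀ e, cs.getLast? = some e → e ≠ '_') →
    pvCollapseA n cs = PySem.Chars.join ['_'] (pvGroups pvNotU cs) := by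
  induction n with
  | zero =>
    intro cs hlen hh hl
    have hninf : ¬(['_', '_'] <:+: cs) := by
      intro h
      have := h.length_le
      simp at this
      omega
    exact pvNoDouble_join_aux cs.length cs le_rfl hninf hh hl
  | succ n ih =>
    intro cs hlen hh hl
    rw [pvCollapseA]
    by_cases hin : PySem.Chars.isIn ['_', '_'] cs = true
    · rw [if_pos hin, pvReplace_eq_rep1]
      have hinf : ['_', '_'] <:+: cs := (PySem.Chars.isIn_iff_infix _ _).mp hin
      have hlt : (pvRep1 cs).length < cs.length := pvRep1_length_lt cs hinf
      have hcsne : cs ≠ [] := by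
        intro h0
        rw [h0] at hinf
        have := hinf.length_le
        simp at this
      have hh' : ∀ e, (pvRep1 cs).head? = some e → e ≠ '_' := by
        intro e he
        cases hcs : cs with
        | nil => exact absurd hcs hcsne
        | cons c t =>
          rw [hcs, pvRep1_head] at he
          have : e = c := by simpa using he.symm
          subst this
          exact hh e (by rw [hcs]; rfl)
      have hl' : ∀ e, (pvRep1 cs).getLast? = some e → e ≠ '_' := by
        intro e he
        cases hle : cs.getLast? with
        | none => rw [List.getLast?_eq_none_iff] at hle; exact absurd hle hcsne
        | some e0 =>
          have he0 : e0 ≠ '_' := hl e0 hle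
          have h3 := pvRep1_last cs e0 hle he0
          rw [h3] at he
          have : e = e0 := by simpa using he.symm
          subst this
          exact he0
      rw [ih (pvRep1 cs) (by omega) hh' hl', pvRep1_groups]
    · rw [if_neg hin]
      have hninf : ¬(['_', '_'] <:+: cs) := by
        rw [← PySem.Chars.isIn_eq_false_iff]
        simpa using hin
      exact pvNoDouble_join_aux cs.length cs le_rfl hninf hh hl

-- a separator-join of nonempty pieces is empty only with no pieces
theorem pvJoin_eq_nil (c : Char) (gs : List (List Char)) (hne : ∀ g ∈ gs, g ≠ [])
    (h : PySem.Chars.join [c] gs = []) : gs = [] := by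
  cases gs with
  | nil => rfl
  | cons g gs' =>
    exfalso
    cases gs' with
    | nil =>
      rw [PySem.Chars.join_singleton] at h
      exact hne g (by simp) h
    | cons g2 gs'' =>
      rw [PySem.Chars.join_cons_cons] at h
      have hlen := congrArg List.length h
      simp at hlen

-- ===== main equivalence =====
theorem pvMain (name : String) : recipe_key_for_name name = recipe_key_for_name_alt name := by
  simp only [recipe_key_for_name, recipe_key_for_name_alt]
  set s : List Char := name.toList with hs
  have htext : PySem.Chars.split₀ (PySem.Chars.strip s) = pvGroups pvNsp s := by
    rw [pvSplit₀_eq, pvGroups_strip]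
  have hGalnum : pvGroups PySem.Chars.isalnum s =
      (pvGroups pvNsp s).flatMap (pvGroups PySem.Chars.isalnum) :=
    pvGroups_refine _ _ pvAlnum_imp_nsp s
  by_cases hempty : (PySem.Chars.join [' '] (PySem.Chars.split₀ (PySem.Chars.strip s))).isEmpty = true
  · rw [if_pos hempty]
    have hnil : pvGroups pvNsp s = [] := by
      apply pvJoin_eq_nil ' '
      · exact pvGroups_ne_nil pvNsp s
      · rw [← htext]
        simpa using hempty
    rw [pvGroupsAlnum_eq, hGalnum, hnil]
    simp [PySem.Chars.join_nil]
  · rw [if_neg hempty]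
    have hclean : PySem.Chars.join []
        ((PySem.Chars.join [' '] (PySem.Chars.split₀ (PySem.Chars.strip s))).map
          (fun c => if PySem.Chars.isalnum c then PySem.Chars.lower [c] else ['_'])) =
        (PySem.Chars.join [' '] (PySem.Chars.split₀ (PySem.Chars.strip s))).map pvF := by
      have hmapeq : (PySem.Chars.join [' '] (PySem.Chars.split₀ (PySem.Chars.strip s))).map
          (fun c => if PySem.Chars.isalnum c then PySem.Chars.lower [c] else ['_']) =
          ((PySem.Chars.join [' '] (PySem.Chars.split₀ (PySem.Chars.strip s))).map pvF).map
            (fun c => [c]) := by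
        rw [List.map_map]
        apply List.map_congr_left
        intro c _
        by_cases h : PySem.Chars.isalnum c = true
        · simp [h, pvF, PySem.Chars.lower]
        · simp [h, pvF]
      rw [hmapeq, PySem.Chars.join_nil_singletons]
    rw [hclean]
    rw [pvCollapse_spec _ _ (by omega)
      (fun e he => pvStripChars_head _ e he) (fun e he => pvStripChars_last _ e he)]
    rw [pvGroups_stripChars]
    rw [pvGroups_map PySem.Chars.isalnum pvNotU pvF pvNotU_f]
    have hmaplower : ∀ (gs : List (List Char)), (∀ g ∈ gs, ∀ c ∈ g, PySem.Chars.isalnum c = true) →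
        gs.map (List.map pvF) = gs.map PySem.Chars.lower := by
      intro gs hgs
      apply List.map_congr_left
      intro g hg
      unfold PySem.Chars.lower
      apply List.map_congr_left
      intro c hc
      simp [pvF, hgs g hg c hc]
    rw [hmaplower _ (pvGroups_mem_pos PySem.Chars.isalnum _)]
    have hgtext : pvGroups PySem.Chars.isalnum
        (PySem.Chars.join [' '] (PySem.Chars.split₀ (PySem.Chars.strip s))) =
        pvGroups PySem.Chars.isalnum s := by
      rw [htext, pvGroups_join_sep _ _ (by decide), ← hGalnum]
    rw [hgtext, pvGroupsAlnum_eq]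

-- ===== VERDICT (by name: the statement is the Claim_ definition above) =====
theorem recipe_key_for_name_spec : Claim_equal_recipe_key_for_name := by
  intro name _
  unfold Spec_recipe_key_for_name
  exact pvMain name
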